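-- pv_equiv track=rewrite | github.com/skalam02/Crypto | csci360_project2/project_2.py | Encrypt2_Setup
-- ===== SOURCE A (Python) =====
-- import math
--
-- def Encrypt2_Setup(key,ciphertext):
--     width = len(key)
--     height = math.ceil(len(ciphertext)/width)
--     matrix= [["X" for x in range(width)] for y in range(height)]
--     r=0
--     c=0
--     index=0
--     while (r<height):
--         while(c<width):
--             if(index==len(ciphertext)):
--                 break
--             matrix[r][c]=ciphertext[index]
--             index=index+1
--             c=c+1
--         r=r+1
--         c=0
--     return matrix
-- ===== SOURCE B (Python) =====
-- import math
--
-- def Encrypt2_Setup(key, ciphertext):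
--     width = len(key)
--     height = math.ceil(len(ciphertext) / width)
--     out = []
--     for r in range(height):
--         row = list(ciphertext[r * width:(r + 1) * width])
--         row += ["X"] * (width - len(row))
--         out.append(row)
--     return out
-- ===== Notes on version B (the rewrite author's own statement) =====
-- stated objective: simpler
-- what changed: Replaces the pre-filled matrix with nested while-loops placing one character per cell by a single loop over row indices that slices the ciphertext per row and pads with 'X'.
import Mathlib
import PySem

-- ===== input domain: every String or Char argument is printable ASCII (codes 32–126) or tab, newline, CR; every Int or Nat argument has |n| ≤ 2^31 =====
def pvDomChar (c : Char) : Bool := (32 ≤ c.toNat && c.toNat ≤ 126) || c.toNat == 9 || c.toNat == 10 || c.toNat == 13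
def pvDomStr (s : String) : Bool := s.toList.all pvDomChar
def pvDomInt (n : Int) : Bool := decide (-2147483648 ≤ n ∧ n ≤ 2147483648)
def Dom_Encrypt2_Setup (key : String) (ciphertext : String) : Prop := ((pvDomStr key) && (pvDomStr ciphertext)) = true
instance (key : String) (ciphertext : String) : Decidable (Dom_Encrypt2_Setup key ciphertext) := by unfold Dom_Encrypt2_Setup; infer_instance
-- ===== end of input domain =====

-- B replaces A's pre-filled matrix + nested while-loop cell placement by one loop over row
-- indices that slices the ciphertext per row and pads with "X" (objective: simpler).

-- ===== PORT A =====
-- inner 'while c < width' loop of A: writes ciphertext chars into row cells starting at index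
-- (cl.getD index 'X' is exact here: the preceding branch guarantees index < cl.length when it is read)
def pvFillRowA (row : List String) (cl : List Char) (c index width : Nat) : List String × Nat :=
  if _h : c < width then
    if index = cl.length then (row, index)
    else pvFillRowA (row.set c (String.ofList [cl.getD index 'X'])) cl (c + 1) (index + 1) width
  else (row, index)
termination_by width - c

-- outer 'while r < height' loop of A (matrix[r][c]=… modelled as extracting row r, filling it, setting it back)
def pvFillA (matrix : List (List String)) (cl : List Char) (r index height width : Nat) :
    List (List String) :=
  if _h : r < height then
    let p := pvFillRowA (matrix.getD r []) cl 0 index width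
    pvFillA (matrix.set r p.1) cl (r + 1) p.2 height width
  else matrix
termination_by height - r

def Encrypt2_Setup (key : String) (ciphertext : String) : List (List String) :=
  let width := key.toList.length
  -- math.ceil(len/width); Nat division by 0 gives height 0, but Pre_ excludes width = 0 (Python raises there)
  let height := (ciphertext.toList.length + width - 1) / width
  let matrix := List.replicate height (List.replicate width "X")
  pvFillA matrix ciphertext.toList 0 0 height width

-- ===== PORT B =====
def Encrypt2_Setup_alt (key : String) (ciphertext : String) : List (List String) :=
  let width := key.toList.length
  let height := (ciphertext.toList.length + width - 1) / width
  (List.range height).map (fun r =>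
    let row := ((ciphertext.toList.drop (r * width)).take width).map (fun ch => String.ofList [ch])
    row ++ List.replicate (width - row.length) "X")

-- ===== PRECONDITION & SPEC =====
-- Pre_ excludes exactly the empty key: there len(key) = 0 and math.ceil(len(ciphertext)/0) raises ZeroDivisionError in both A and B.
def Pre_Encrypt2_Setup (key : String) (ciphertext : String) : Prop := key.toList ≠ []
instance (key : String) (ciphertext : String) : Decidable (Pre_Encrypt2_Setup key ciphertext) := by
  unfold Pre_Encrypt2_Setup; infer_instance
def pvWitness_Encrypt2_Setup : String × String := ("ab", "HELLO")

def Spec_Encrypt2_Setup (key : String) (ciphertext : String) (out : List (List String)) : Prop := out = Encrypt2_Setup_alt key ciphertext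
instance (key : String) (ciphertext : String) (out : List (List String)) : Decidable (Spec_Encrypt2_Setup key ciphertext out) := by unfold Spec_Encrypt2_Setup; infer_instance

-- ===== CLAIM (what is proved, stated in full; the proofs are below) =====
def Claim_equal_Encrypt2_Setup : Prop := ∀ (key : String) (ciphertext : String), Dom_Encrypt2_Setup key ciphertext → Pre_Encrypt2_Setup key ciphertext → Spec_Encrypt2_Setup key ciphertext (Encrypt2_Setup key ciphertext)

-- ===== LEMMAS AND PROOFS =====

-- row r of B's output, as a standalone function
def pvBrow (cl : List Char) (w k : Nat) : List String :=
  let row := ((cl.drop (k * w)).take w).map (fun ch => String.ofList [ch])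
  row ++ List.replicate (w - row.length) "X"

-- A's inner loop overwrites row[c..] with the next ciphertext chunk and advances index by the chunk length
theorem pvFillRowA_eq (cl : List Char) (w : Nat) :
    ∀ (row : List String) (c index : Nat), index ≤ cl.length → w ≤ row.length →
    pvFillRowA row cl c index w =
      (row.take c ++ ((cl.drop index).take (w - c)).map (fun ch => String.ofList [ch]) ++
         row.drop (c + min (w - c) (cl.length - index)),
       index + min (w - c) (cl.length - index)) := by
  intro row c index
  induction row, c, index using pvFillRowA.induct cl w with
  | case1 row c hc =>
    intro _ _
    rw [pvFillRowA]
    simp [hc]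
  | case2 row c index hc hend ih =>
    intro hi hw
    have hilt : index < cl.length := lt_of_le_of_ne hi hend
    rw [pvFillRowA]
    simp only [hc, dif_pos, hend, if_neg, not_false_iff]
    rw [ih (by omega) (by simpa using hw)]
    have hcrow : c < row.length := by omega
    have hset : row.set c (String.ofList [cl.getD index 'X']) =
        row.take c ++ String.ofList [cl[index]] :: row.drop (c + 1) := by
      rw [List.set_eq_take_cons_drop _ hcrow, List.getD_eq_getElem cl 'X' hilt]
    have hlt : (row.take c).length = c := by simp; omega
    have hdropc : cl.drop index = cl[index] :: cl.drop (index + 1) :=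
      List.drop_eq_getElem_cons hilt
    have htake : (cl.drop index).take (w - c) =
        cl[index] :: (cl.drop (index + 1)).take (w - (c + 1)) := by
      rw [hdropc]
      have h1 : w - c = (w - (c + 1)) + 1 := by omega
      rw [h1, List.take_succ_cons]
    have hm : min (w - (c + 1)) (cl.length - (index + 1)) + 1
        = min (w - c) (cl.length - index) := by omega
    rw [Prod.mk.injEq]
    refine ⟨?_, by omega⟩
    rw [hset, htake]
    have htk : (row.take c ++ String.ofList [cl[index]] :: row.drop (c + 1)).take (c + 1)
        = row.take c ++ [String.ofList [cl[index]]] := by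
      rw [List.take_append]
      simp [hlt, List.take_take]
    have hdk : ∀ m : Nat, (row.take c ++ String.ofList [cl[index]] :: row.drop (c + 1)).drop (c + 1 + m)
        = row.drop (c + 1 + m) := by
      intro m
      rw [List.drop_append, hlt]
      rw [show c + 1 + m - c = m + 1 by omega, List.drop_succ_cons, List.drop_drop]
      have hnil : List.drop (c + 1 + m) (List.take c row) = [] :=
        List.drop_eq_nil_of_le (by rw [hlt]; omega)
      rw [hnil, List.nil_append]
    rw [htk, hdk, ← hm]
    simp only [List.map_cons, List.append_assoc, List.cons_append, List.nil_append]
    have : c + 1 + min (w - (c + 1)) (cl.length - (index + 1))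
        = c + (min (w - (c + 1)) (cl.length - (index + 1)) + 1) := by omega
    rw [this]
  | case3 row c index hc =>
    intro hi hw
    rw [pvFillRowA]
    have h0 : w - c = 0 := by omega
    simp [hc, h0]

-- A's outer loop, started on a matrix whose rows ≥ r are all "X", produces B's rows
theorem pvFillA_eq (cl : List Char) (h w : Nat) (hw : 0 < w)
    (hh : h = (cl.length + w - 1) / w) :
    ∀ (mat : List (List String)) (r i : Nat), mat.length = h →
      (∀ k, r ≤ k → k < h → mat[k]? = some (List.replicate w "X")) →
      i = min cl.length (r * w) →
      pvFillA mat cl r i h w =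
        mat.take r ++ (List.range (h - r)).map (fun t => pvBrow cl w (r + t)) := by
  intro mat r i
  induction mat, r, i using pvFillA.induct cl h w with
  | case1 mat r i hr p ih =>
    intro hlen hrep hi
    have h1 : (r + 1) * w ≤ cl.length + w - 1 := by
      rw [← Nat.le_div_iff_mul_le hw, ← hh]; omega
    have hrw : r * w < cl.length := by
      have : (r + 1) * w = r * w + w := by ring
      omega
    have hi' : i = r * w := by omega
    have hgd : mat.getD r [] = List.replicate w "X" := by
      rw [List.getD_eq_getElem?_getD, hrep r le_rfl hr]; rfl
    have hrowEq := pvFillRowA_eq cl w (List.replicate w "X") 0 (r * w) (by omega) (by simp)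
    have hp : pvFillRowA (mat.getD r []) cl 0 i w
        = (pvBrow cl w r, min cl.length ((r + 1) * w)) := by
      rw [hgd, hi', hrowEq, Prod.mk.injEq]
      constructor
      · unfold pvBrow
        simp only [List.take_zero, List.nil_append, Nat.zero_add, List.drop_replicate,
          Nat.sub_zero]
        congr 2
        simp
      · simp only [Nat.sub_zero]
        have : (r + 1) * w = r * w + w := by ring
        omega
    rw [pvFillA]
    simp only [hr, dif_pos]
    simp only [p, hp] at ih
    rw [hp]
    rw [ih (by simp [hlen]) (fun k hk1 hk2 => by
          rw [List.getElem?_set_ne (by omega)]; exact hrep k (by omega) hk2) trivial]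
    have htk : (mat.set r (pvBrow cl w r)).take (r + 1) = mat.take r ++ [pvBrow cl w r] := by
      rw [List.set_eq_take_cons_drop _ (show r < mat.length by omega), List.take_append]
      have hlt : (mat.take r).length = r := by simp; omega
      rw [hlt]
      simp [List.take_take]
    rw [htk]
    have hr1 : h - r = (h - (r + 1)) + 1 := by omega
    rw [hr1, List.range_succ_eq_map, List.map_cons, List.map_map]
    simp only [Nat.add_zero, List.append_assoc, List.singleton_append]
    congr 2
    exact List.map_congr_left fun t _ => by
      simp only [Function.comp_apply]
      congr 1
      omega
  | case2 mat r i hr =>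
    intro hlen hrep hi
    rw [pvFillA]
    simp only [hr, dif_neg, not_false_iff]
    have : h - r = 0 := by omega
    rw [this]
    simp [List.take_of_length_le (by omega : mat.length ≤ r)]

-- ===== VERDICT (by name: the statement is the Claim_ definition above) =====
theorem Encrypt2_Setup_spec : Claim_equal_Encrypt2_Setup := by
  intro key ciphertext _ hpre
  unfold Spec_Encrypt2_Setup Encrypt2_Setup Encrypt2_Setup_alt
  have hw : 0 < key.toList.length := List.length_pos_of_ne_nil hpre
  rw [pvFillA_eq ciphertext.toList _ _ hw rfl _ 0 0 (by simp)
      (fun k _ hk => by simp only [List.getElem?_replicate, if_pos hk]) (by simp)]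
  simp [pvBrow]
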